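-- pv_equiv track=rewrite | github.com/desecho/adventofcode | 2018/13-1.py | get_crash_coord
-- ===== SOURCE A (Python) =====
-- def get_crash_coord(carts_initial, carts_moved):
--     carts = carts_initial + carts_moved
--     for cart in carts:
--         carts_copy = list(carts)
--         carts_copy.remove(cart)
--         coord = cart[1]
--         coords_copy = [x[1] for x in carts_copy]
--         if coord in coords_copy:
--             return coord
-- ===== SOURCE B (Python) =====
-- def get_crash_coord(carts_initial, carts_moved):
--     carts = carts_initial + carts_moved
--     coords = sorted(cart[1] for cart in carts)
--     collided = set()
--     for prev, cur in zip(coords, coords[1:]):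
--         if prev == cur:
--             collided.add(cur)
--     for cart in carts:
--         if cart[1] in collided:
--             return cart[1]
--     return None
-- ===== Notes on version B (the rewrite author's own statement) =====
-- stated objective: faster
-- what changed: Replaces A's nested remove-copy-and-rescan with sort-based duplicate detection: sort all coordinates, collect into a set every coordinate equal to its sorted neighbour, then one ordered scan over the carts returns the first coordinate in that set.
import Mathlib
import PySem

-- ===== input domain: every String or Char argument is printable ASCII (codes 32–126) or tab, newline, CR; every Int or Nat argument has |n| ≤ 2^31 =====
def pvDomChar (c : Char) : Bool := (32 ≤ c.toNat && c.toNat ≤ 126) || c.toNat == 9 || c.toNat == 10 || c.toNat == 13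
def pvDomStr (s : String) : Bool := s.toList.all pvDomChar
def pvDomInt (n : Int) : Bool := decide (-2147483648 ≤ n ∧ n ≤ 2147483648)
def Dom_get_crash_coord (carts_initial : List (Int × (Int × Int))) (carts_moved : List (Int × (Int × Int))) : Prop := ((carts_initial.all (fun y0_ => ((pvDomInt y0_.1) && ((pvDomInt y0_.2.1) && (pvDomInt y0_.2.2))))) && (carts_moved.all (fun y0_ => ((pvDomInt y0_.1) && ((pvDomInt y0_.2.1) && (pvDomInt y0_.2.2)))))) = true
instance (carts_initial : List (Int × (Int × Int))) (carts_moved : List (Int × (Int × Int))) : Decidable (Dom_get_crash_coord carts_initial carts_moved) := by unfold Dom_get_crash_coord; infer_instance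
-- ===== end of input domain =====

-- B replaces A's quadratic remove-copy-and-rescan with a sort: sort the coordinates,
-- mark every coordinate equal to its sorted neighbour as a collision, then one ordered
-- scan returns the first cart whose coordinate collided (objective: faster).

-- ===== PORT A =====
-- the 'for cart in carts: … return coord' loop of A; 'none' in the remove? branch is
-- unreachable (cart is always drawn from carts), mirroring that list.remove cannot raise here
def pvAGo (carts : List (Int × (Int × Int))) : List (Int × (Int × Int)) → Option (Int × Int)
  | [] => none
  | cart :: rest =>
    match PySem.List.remove? carts cart with
    | none => none
    | some carts_copy =>
      if cart.2 ∈ carts_copy.map (·.2) then some cart.2 else pvAGo carts rest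

def get_crash_coord (carts_initial : List (Int × (Int × Int))) (carts_moved : List (Int × (Int × Int))) : Option (Int × Int) :=
  let carts := carts_initial ++ carts_moved
  pvAGo carts carts

-- ===== PORT B =====
-- the 'for prev, cur in zip(coords, coords[1:]): …' loop of B: walk adjacent pairs of the
-- sorted coordinate list in order, adding cur to the collision set whenever prev == cur
def pvAdjDups : List (Int × Int) → PySem.Set (Int × Int) → PySem.Set (Int × Int)
  | a :: b :: t, s => pvAdjDups (b :: t) (if a = b then PySem.Set.add s b else s)
  | _, s => s

-- second loop of B: first cart whose coordinate is in the collision set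
def pvBFind (collided : PySem.Set (Int × Int)) : List (Int × (Int × Int)) → Option (Int × Int)
  | [] => none
  | cart :: rest => if cart.2 ∈ collided then some cart.2 else pvBFind collided rest

-- Python's sorted on (int, int) tuples compares lexicographically: sorted2 with the two components as keys
def get_crash_coord_alt (carts_initial : List (Int × (Int × Int))) (carts_moved : List (Int × (Int × Int))) : Option (Int × Int) :=
  let carts := carts_initial ++ carts_moved
  let coords := PySem.List.sorted2 (carts.map (·.2)) (·.1) (·.2) false
  let collided := pvAdjDups coords PySem.Set.empty
  pvBFind collided carts

-- ===== PRECONDITION & SPEC =====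
def Spec_get_crash_coord (carts_initial : List (Int × (Int × Int))) (carts_moved : List (Int × (Int × Int))) (out : Option (Int × Int)) : Prop := out = get_crash_coord_alt carts_initial carts_moved
instance (carts_initial : List (Int × (Int × Int))) (carts_moved : List (Int × (Int × Int))) (out : Option (Int × Int)) : Decidable (Spec_get_crash_coord carts_initial carts_moved out) := by unfold Spec_get_crash_coord; infer_instance

-- ===== CLAIM (what is proved, stated in full; the proofs are below) =====
def Claim_equal_get_crash_coord : Prop := ∀ (carts_initial : List (Int × (Int × Int))) (carts_moved : List (Int × (Int × Int))), Dom_get_crash_coord carts_initial carts_moved → Spec_get_crash_coord carts_initial carts_moved (get_crash_coord carts_initial carts_moved)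

-- ===== LEMMAS AND PROOFS =====

-- the lexicographic 'before' comparator sorted2 uses on coordinate pairs
def pvBefore (a b : Int × Int) : Bool :=
  decide (a.1 < b.1) || (!decide (b.1 < a.1) && decide (a.2 < b.2))

-- 'not strictly after': the sorted order we prove pairwise
def pvR (a b : Int × Int) : Prop := pvBefore b a = false

lemma pvBefore_asym (a b : Int × Int) (h : pvBefore a b = true) : pvBefore b a = false := by
  simp [pvBefore] at *; omega

lemma pvBefore_trans (a b c : Int × Int) (h1 : pvBefore a b = true) (h2 : pvBefore b c = true) :
    pvBefore a c = true := by
  simp [pvBefore] at *; omega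

lemma pvR_antisymm (a b : Int × Int) (h1 : pvR a b) (h2 : pvR b a) : a = b := by
  simp [pvR, pvBefore] at *
  exact Prod.ext (by omega) (by omega)

lemma pvInsertBy_pairwise (x : Int × Int) (acc : List (Int × Int))
    (h : acc.Pairwise pvR) : (PySem.List.insertBy pvBefore x acc).Pairwise pvR := by
  induction acc with
  | nil => simp [PySem.List.insertBy]
  | cons a t ih =>
    rw [List.pairwise_cons] at h
    obtain ⟨ha, ht⟩ := h
    by_cases hb : pvBefore x a = true
    · simp only [PySem.List.insertBy, hb, if_true]
      refine List.Pairwise.cons ?_ (List.Pairwise.cons ha ht)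
      intro y hy
      rcases List.mem_cons.mp hy with rfl | hyt
      · exact pvBefore_asym _ _ hb
      · show pvBefore y x = false
        by_contra hc
        have : pvBefore y a = true := pvBefore_trans _ _ _ (by simpa using hc) hb
        exact absurd (ha y hyt) (by simp [pvR, this])
    · simp only [PySem.List.insertBy, hb]
      refine List.Pairwise.cons ?_ (ih ht)
      intro y hy
      rcases (PySem.List.mem_insertBy _ _ _ _).mp hy with rfl | hyt
      · simpa [pvR] using hb
      · exact ha y hyt

lemma pvFoldl_insertBy_pairwise (xs : List (Int × Int)) (acc : List (Int × Int))
    (h : acc.Pairwise pvR) :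
    (xs.foldl (fun acc x => PySem.List.insertBy pvBefore x acc) acc).Pairwise pvR := by
  induction xs generalizing acc with
  | nil => exact h
  | cons x t ih => exact ih _ (pvInsertBy_pairwise x acc h)

lemma pvSorted2_pairwise (xs : List (Int × Int)) :
    (PySem.List.sorted2 xs (·.1) (·.2) false).Pairwise pvR :=
  pvFoldl_insertBy_pairwise xs [] List.Pairwise.nil

-- 'some adjacent pair of l equals x'
def pvHasAdj (x : Int × Int) : List (Int × Int) → Prop
  | a :: b :: t => (a = b ∧ b = x) ∨ pvHasAdj x (b :: t)
  | _ => False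

lemma mem_pvAdjDups (l : List (Int × Int)) (s : PySem.Set (Int × Int)) (x : Int × Int) :
    x ∈ pvAdjDups l s ↔ x ∈ s ∨ pvHasAdj x l := by
  induction l generalizing s with
  | nil => simp [pvAdjDups, pvHasAdj]
  | cons a t ih =>
    cases t with
    | nil => simp [pvAdjDups, pvHasAdj]
    | cons b t' =>
      show x ∈ pvAdjDups (b :: t') (if a = b then PySem.Set.add s b else s) ↔ _
      rw [ih]
      by_cases hab : a = b
      · simp [pvHasAdj, hab, PySem.Set.mem_add]
        tauto
      · simp [pvHasAdj, hab]

lemma count_of_pvHasAdj (l : List (Int × Int)) (x : Int × Int) (h : pvHasAdj x l) :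
    1 < l.count x := by
  induction l with
  | nil => simp [pvHasAdj] at h
  | cons a t ih =>
    cases t with
    | nil => simp [pvHasAdj] at h
    | cons b t' =>
      rcases h with ⟨rfl, rfl⟩ | h
      · simp [List.count_cons_self]
      · have := ih h
        simp only [List.count_cons] at *
        omega

lemma pvHasAdj_of_count (l : List (Int × Int)) (hp : l.Pairwise pvR) (x : Int × Int)
    (h : 1 < l.count x) : pvHasAdj x l := by
  induction l with
  | nil => simp at h
  | cons a t ih =>
    rw [List.pairwise_cons] at hp
    obtain ⟨ha, ht⟩ := hp
    by_cases hax : a = x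
    · subst hax
      have hmem : a ∈ t := by
        rw [List.count_cons_self] at h
        rw [← List.count_pos_iff]
        omega
      cases t with
      | nil => simp at hmem
      | cons b t' =>
        by_cases hba : b = a
        · exact Or.inl ⟨hba.symm, hba⟩
        · exfalso
          have hat' : a ∈ t' := by
            rcases List.mem_cons.mp hmem with h' | h'
            · exact absurd h'.symm hba
            · exact h'
          rw [List.pairwise_cons] at ht
          have h1 : pvR b a := ht.1 a hat'
          have h2 : pvR a b := ha b (by simp)
          exact hba (pvR_antisymm b a h1 h2)
    · have hct : 1 < t.count x := by
        simp [List.count_cons, hax] at h ⊢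
        omega
      have := ih ht hct
      cases t with
      | nil => simp at hct
      | cons b t' => exact Or.inr this

-- A's test 'coord in coords of (carts minus this cart)' is 'coord occurs ≥ 2 times overall'
lemma pv_mem_erase_iff (carts : List (Int × (Int × Int))) (cart : Int × (Int × Int))
    (h : cart ∈ carts) :
    (cart.2 ∈ (carts.erase cart).map (·.2)) ↔ 1 < (carts.map (·.2)).count cart.2 := by
  have hperm : (carts.map (·.2)).Perm (cart.2 :: (carts.erase cart).map (·.2)) := by
    simpa using (List.perm_cons_erase h).map (·.2)
  rw [hperm.count_eq, List.count_cons_self]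
  rw [← List.count_pos_iff]
  omega

-- the two scans agree on any suffix of carts, given collided is exactly the duplicated coordinates
lemma pv_go_eq (carts : List (Int × (Int × Int))) (collided : PySem.Set (Int × Int))
    (hc : ∀ x, x ∈ collided ↔ 1 < (carts.map (·.2)).count x)
    (rest : List (Int × (Int × Int))) (hsub : ∀ c ∈ rest, c ∈ carts) :
    pvAGo carts rest = pvBFind collided rest := by
  induction rest with
  | nil => rfl
  | cons cart rest ih =>
    have hmem : cart ∈ carts := hsub cart (by simp)
    simp only [pvAGo, pvBFind, PySem.List.remove?_eq_some_erase carts cart hmem]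
    have h1 := pv_mem_erase_iff carts cart hmem
    have h2 := hc cart.2
    split_ifs with ha hb hb
    · rfl
    · exact absurd (h2.mpr (h1.mp ha)) hb
    · exact absurd (h1.mpr (h2.mp hb)) ha
    · exact ih (fun c hcm => hsub c (by simp [hcm]))

-- ===== VERDICT (by name: the statement is the Claim_ definition above) =====
theorem get_crash_coord_spec : Claim_equal_get_crash_coord := by
  intro ci cm _
  show get_crash_coord ci cm = get_crash_coord_alt ci cm
  unfold get_crash_coord get_crash_coord_alt
  refine pv_go_eq _ _ (fun x => ?_) _ (fun c hc => hc)
  rw [mem_pvAdjDups]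
  have hperm : (PySem.List.sorted2 ((ci ++ cm).map (·.2)) (·.1) (·.2) false).Perm
      ((ci ++ cm).map (·.2)) := PySem.List.sorted2_perm _ _ _ _
  rw [← hperm.count_eq]
  constructor
  · rintro (h | h)
    · simp [PySem.Set.empty] at h
    · exact count_of_pvHasAdj _ _ h
  · intro h
    exact Or.inr (pvHasAdj_of_count _ (pvSorted2_pairwise _) _ h)
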